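-- pv_equiv track=rewrite | github.com/erikblanchard/tictac_py | tictactoe.py | board_columns
-- ===== SOURCE A (Python) =====
-- def board_columns(game_dict, board_size, board_size_sq):
--     temp_column = []
--     for column in range(board_size):
--         list_temp=[]
--         for i, num in enumerate(range(1, board_size_sq+1, board_size)):
--             list_temp.append(game_dict[num+column])
--         temp_column.append(list_temp)
--     return temp_column
-- ===== SOURCE B (Python) =====
-- def board_columns(game_dict, board_size, board_size_sq):
--     if board_size <= 0:
--         return []
--     flat = [game_dict[k]
--             for start in range(1, board_size_sq + 1, board_size)
--             for k in range(start, start + board_size)]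
--     return [flat[j::board_size] for j in range(board_size)]
-- ===== Notes on version B (the rewrite author's own statement) =====
-- stated objective: alternative
-- what changed: B builds one flat row-major list of the accessed board cells with a single flattened comprehension and then extracts each column as a stride slice flat[j::board_size], instead of A's nested per-column append loops.
import Mathlib
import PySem

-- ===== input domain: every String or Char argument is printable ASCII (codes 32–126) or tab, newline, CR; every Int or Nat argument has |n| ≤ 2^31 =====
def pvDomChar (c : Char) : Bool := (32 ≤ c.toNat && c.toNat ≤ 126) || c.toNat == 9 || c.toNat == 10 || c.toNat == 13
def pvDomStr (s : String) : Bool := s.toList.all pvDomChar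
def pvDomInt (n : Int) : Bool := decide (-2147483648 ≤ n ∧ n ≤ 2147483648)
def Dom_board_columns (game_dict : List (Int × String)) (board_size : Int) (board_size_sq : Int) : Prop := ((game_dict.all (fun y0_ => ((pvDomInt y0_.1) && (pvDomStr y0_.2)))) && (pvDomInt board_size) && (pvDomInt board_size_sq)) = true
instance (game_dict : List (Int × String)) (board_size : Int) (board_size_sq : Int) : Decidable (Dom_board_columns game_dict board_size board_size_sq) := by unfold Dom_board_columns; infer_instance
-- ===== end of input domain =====

-- B gathers the accessed cells into one flat row-major list and reads each column off it as a
-- stride slice flat[j::board_size]; equal return value, no speed claim.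

-- ===== PORT A =====
def board_columns (game_dict : List (Int × String)) (board_size : Int) (board_size_sq : Int) : List (List String) :=
  (PySem.List.pyRange 0 board_size 1).foldl
    (fun temp_column column =>
      temp_column ++
        [(PySem.List.enumerate (PySem.List.pyRange 1 (board_size_sq + 1) board_size)).foldl
           (fun list_temp p =>
             -- game_dict[num+column]: dict lookup; KeyError excluded by Pre_
             list_temp ++ [((PySem.Dict.ofList game_dict).get? (p.2 + column)).getD ""]) []])
    []

-- ===== PORT B =====
def board_columns_alt (game_dict : List (Int × String)) (board_size : Int) (board_size_sq : Int) : List (List String) :=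
  if board_size ≤ 0 then []
  else
    -- flat = [game_dict[k] for start in range(1, sq+1, bs) for k in range(start, start+bs)]
    let flat :=
      (PySem.List.pyRange 1 (board_size_sq + 1) board_size).flatMap
        (fun start =>
          (PySem.List.pyRange start (start + board_size) 1).map
            (fun k => ((PySem.Dict.ofList game_dict).get? k).getD ""))
    -- [flat[j::board_size] for j in range(board_size)]
    (PySem.List.pyRange 0 board_size 1).map
      (fun j => (PySem.List.slice? flat (some j) none board_size).getD [])

-- ===== PRECONDITION & SPEC =====
-- Pre_ excludes exactly the inputs on which A raises KeyError: some accessed key num+column missing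
-- from game_dict. The accessed keys form the contiguous interval [1, 1 + bs*((sq-1)//bs) + bs); since
-- the dict's keys are distinct, all are present iff the count of dict keys in that interval equals its size.
def Pre_board_columns (game_dict : List (Int × String)) (board_size : Int) (board_size_sq : Int) : Prop :=
  board_size ≤ 0 ∨ board_size_sq < 1 ∨
    ((((PySem.Dict.ofList game_dict).keys.filter
        (fun k => decide (1 ≤ k ∧
          k < 1 + board_size * ((board_size_sq - 1) / board_size) + board_size))).length : Int)
      = board_size * ((board_size_sq - 1) / board_size) + board_size)
instance (game_dict : List (Int × String)) (board_size : Int) (board_size_sq : Int) : Decidable (Pre_board_columns game_dict board_size board_size_sq) := by unfold Pre_board_columns; infer_instance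

def pvWitness_board_columns : (List (Int × String)) × Int × Int :=
  ([(1, "X"), (2, "O"), (3, "X"), (4, "O")], 2, 4)

def Spec_board_columns (game_dict : List (Int × String)) (board_size : Int) (board_size_sq : Int) (out : List (List String)) : Prop := out = board_columns_alt game_dict board_size board_size_sq
instance (game_dict : List (Int × String)) (board_size : Int) (board_size_sq : Int) (out : List (List String)) : Decidable (Spec_board_columns game_dict board_size board_size_sq out) := by unfold Spec_board_columns; infer_instance

-- ===== CLAIM =====
def Claim_equal_board_columns : Prop := ∀ (game_dict : List (Int × String)) (board_size : Int) (board_size_sq : Int), Dom_board_columns game_dict board_size board_size_sq → Pre_board_columns game_dict board_size board_size_sq → Spec_board_columns game_dict board_size board_size_sq (board_columns game_dict board_size board_size_sq)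

-- ===== LEMMAS AND PROOFS =====

lemma foldl_concat_map {α β : Type} (g : α → β) :
    ∀ (l : List α) (acc : List β), l.foldl (fun a x => a ++ [g x]) acc = acc ++ l.map g := by
  intro l
  induction l with
  | nil => intro acc; simp
  | cons x xs ih => intro acc; simp [List.foldl_cons, ih]

-- A as a nested map
lemma portA_eq (game_dict : List (Int × String)) (board_size board_size_sq : Int) :
    board_columns game_dict board_size board_size_sq =
      (PySem.List.pyRange 0 board_size 1).map (fun column =>
        (PySem.List.pyRange 1 (board_size_sq + 1) board_size).map
          (fun num => ((PySem.Dict.ofList game_dict).get? (num + column)).getD "")) := by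
  unfold board_columns
  rw [foldl_concat_map]
  simp only [List.nil_append]
  apply List.map_congr_left
  intro column _
  rw [foldl_concat_map]
  simp only [List.nil_append]
  rw [show (fun p : Int × Int => ((PySem.Dict.ofList game_dict).get? (p.2 + column)).getD "")
        = (fun num => ((PySem.Dict.ofList game_dict).get? (num + column)).getD "") ∘ (fun p : Int × Int => p.2) from rfl]
  rw [← List.map_map, PySem.List.map_snd_enumerate]

-- stride slice of a list of length r*b: flat[j::b] = [flat[j + b*k] for k in range r]
lemma sliceIndices_pos (n : Nat) (j b : Int) (hj : 0 ≤ j) (hb : 0 < b) :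
    PySem.List.sliceIndices n (some j) none b = (min j n, (n:Int), b) := by
  have h1 : ¬ b < 0 := by omega
  have h2 : ¬ j < 0 := by omega
  unfold PySem.List.sliceIndices
  simp only [h1, h2, if_false]

lemma stride_slice {α : Type} (flat : List α) (d : α) (b r j : Nat) (hb : 0 < b) (hj : j < b)
    (hlen : flat.length = r * b) :
    PySem.List.slice? flat (some (j : Int)) none (b : Int)
      = some ((List.range r).map (fun k => flat.getD (j + b * k) d)) := by
  have hbne : (b : Int) ≠ 0 := by exact_mod_cast hb.ne'
  have hbi : (0:Int) < b := by exact_mod_cast hb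
  unfold PySem.List.slice?
  rw [if_neg hbne, hlen, sliceIndices_pos _ _ _ (by positivity) hbi]
  simp only [hbi, if_true]
  rcases Nat.eq_zero_or_pos r with hr | hr
  · subst hr
    have h0 : min (j:Int) ((0 * b : Nat) : Int) = 0 := by simp
    rw [h0]
    norm_num
  · have hjrb : j < r * b := lt_of_lt_of_le hj (Nat.le_mul_of_pos_left b hr)
    have hjr : min (j:Int) ((r*b : Nat):Int) = j := by omega
    rw [hjr]
    have hlt : (j:Int) < ((r*b : Nat):Int) := by exact_mod_cast hjrb
    rw [if_pos hlt]
    have hcount : ((((r*b:Nat):Int) - j + b - 1) / b).toNat = r := by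
      have : (((r*b:Nat):Int) - j + b - 1) / b = r := by
        rw [Int.ediv_eq_iff_of_pos hbi]
        constructor <;> push_cast <;> nlinarith
      omega
    rw [hcount]
    have := List.filterMap_eq_map (f := fun k : Nat => flat.getD (j + b * k) d)
    rw [← congrFun this (List.range r)]
    congr 1
    apply List.filterMap_congr
    intro k hk
    simp only [Function.comp_apply]
    rw [List.mem_range] at hk
    have hidx : ((j:Int) + b * k).toNat = j + b * k := by omega
    rw [hidx]
    have hin : j + b * k < flat.length := by
      rw [hlen]
      calc j + b * k < b + b * k := by omega
        _ ≤ b * r := by nlinarith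
        _ = r * b := by ring
    rw [List.getElem?_eq_getElem hin, List.getD_eq_getElem _ _ hin]

-- the (j + b*k)-th element of a flatMap of b-sized blocks is the j-th element of block k
lemma flat_get {α β : Type} (f : α → List β) (d : β) (a0 : α) (b : Nat)
    (hf : ∀ a, (f a).length = b) (j : Nat) (hj : j < b) :
    ∀ (L : List α) (k : Nat), k < L.length →
      (L.flatMap f).getD (j + b * k) d = (f (L.getD k a0)).getD j d := by
  intro L
  induction L with
  | nil => intro k hk; simp at hk
  | cons a L ih =>
      intro k hk
      rw [List.flatMap_cons]
      cases k with
      | zero =>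
          have hjl : j + b * 0 < (f a).length := by rw [hf]; omega
          rw [List.getD_append _ _ _ _ hjl]
          simp
      | succ k =>
          have hge : j + b * (k+1) = (f a).length + (j + b * k) := by rw [hf]; ring
          rw [hge, List.getD_append_right _ _ _ _ (by omega), Nat.add_sub_cancel_left]
          exact ih k (by simpa using hk)

-- ===== VERDICT =====
theorem board_columns_spec : Claim_equal_board_columns := by
  intro game_dict board_size board_size_sq _ _
  unfold Spec_board_columns
  rw [portA_eq]
  unfold board_columns_alt
  by_cases hbs : board_size ≤ 0
  · rw [if_pos hbs, PySem.List.pyRange_one_eq_nil hbs, List.map_nil]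
  · rw [if_neg hbs]
    have hbs' : 0 < board_size := by omega
    set g : Int → String := fun k => ((PySem.Dict.ofList game_dict).get? k).getD "" with hg
    set L := PySem.List.pyRange 1 (board_size_sq + 1) board_size with hL
    set block : Int → List String :=
      fun s => (PySem.List.pyRange s (s + board_size) 1).map g with hblock
    obtain ⟨b, rfl⟩ : ∃ n : Nat, board_size = (n : Int) :=
      ⟨board_size.toNat, (Int.toNat_of_nonneg (by omega)).symm⟩
    have hb : 0 < b := by exact_mod_cast hbs'
    have hblen : ∀ s, (block s).length = b := by
      intro s
      simp [hblock, PySem.List.length_pyRange_one]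
    have hflatlen : (L.flatMap block).length = L.length * b := by
      rw [List.length_flatMap]
      rw [List.map_congr_left (fun a _ => hblen a)]
      simp [Nat.mul_comm]
    apply List.map_congr_left
    intro j hj
    rw [PySem.List.mem_pyRange_one] at hj
    obtain ⟨jn, rfl⟩ : ∃ n : Nat, j = (n : Int) :=
      ⟨j.toNat, (Int.toNat_of_nonneg (by omega)).symm⟩
    have hjn : jn < b := by exact_mod_cast hj.2
    rw [stride_slice (L.flatMap block) "" b L.length jn hb hjn hflatlen]
    rw [Option.getD_some]
    apply List.ext_getElem
    · simp
    · intro k h1 h2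
      have hk : k < L.length := by simpa using h1
      rw [List.getElem_map, List.getElem_map, List.getElem_range]
      rw [flat_get block "" 0 b hblen jn hjn L k hk]
      have hLk : L.getD k 0 = L[k] := List.getD_eq_getElem _ _ hk
      rw [hLk, hblock]
      simp only []
      have hjb : jn < (PySem.List.pyRange L[k] (L[k] + b) 1).length := by
        rw [PySem.List.length_pyRange_one]; omega
      rw [List.getD_eq_getElem _ _ (by simpa using hjb), List.getElem_map,
          PySem.List.getElem_pyRange_one]
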